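-- pv_equiv track=rewrite | github.com/ilealm/cracking-practices | cracking_practices/class_scheduling/class_scheduling.py | get_earlier_class
-- ===== SOURCE A (Python) =====
-- def get_earlier_class(classes, starting_at = '06:00'):
--     if classes == [] : return []
--
--     earlier_ending_hr = '23:00'
--     earlier_ending_class = []
--     for i in range(len(classes)):
--         starts_at, ends_at  = classes[i]
--
--         if starts_at >= starting_at:
--             if ends_at < earlier_ending_hr :
--                 earlier_ending_hr = ends_at
--                 earlier_ending_class = classes[i]
--
--
--     return earlier_ending_class
-- ===== SOURCE B (Python) =====
-- def get_earlier_class(classes, starting_at='06:00'):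
--     # Sort by end time (stable), then the first qualifying class is the answer.
--     for c in sorted(classes, key=lambda c: c[1]):
--         if c[0] >= starting_at and c[1] < '23:00':
--             return c
--     return []
-- ===== Notes on version B (the rewrite author's own statement) =====
-- stated objective: alternative
-- what changed: Replaces the single-pass running-minimum loop with sort-then-scan: stably sort the classes by end time, then return the first class that starts at or after starting_at and ends before '23:00' (stability plus the strict-< tie-break make this the same element A selects).
import Mathlib
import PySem

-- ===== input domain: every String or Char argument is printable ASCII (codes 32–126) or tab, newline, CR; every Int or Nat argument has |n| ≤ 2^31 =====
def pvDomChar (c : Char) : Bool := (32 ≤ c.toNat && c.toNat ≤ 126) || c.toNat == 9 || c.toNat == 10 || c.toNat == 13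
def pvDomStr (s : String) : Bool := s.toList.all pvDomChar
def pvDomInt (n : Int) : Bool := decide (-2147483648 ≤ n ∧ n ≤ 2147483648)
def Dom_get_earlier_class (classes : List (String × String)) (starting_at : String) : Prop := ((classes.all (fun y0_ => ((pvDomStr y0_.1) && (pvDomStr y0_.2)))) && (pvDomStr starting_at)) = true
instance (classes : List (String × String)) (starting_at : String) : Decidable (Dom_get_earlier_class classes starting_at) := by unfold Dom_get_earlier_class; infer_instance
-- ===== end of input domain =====

-- B replaces A's running-minimum sentinel loop with sort-by-end-time-then-first-match (objective: alternative).


-- ===== PORT A =====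
-- A's loop over range(len(classes)) reading classes[i] is ported as the fold over
-- the list in the same order, with the same (earlier_ending_hr, earlier_ending_class) state.
def get_earlier_class (classes : List (String × String)) (starting_at : String) : List String :=
  if classes = [] then []
  else
    (classes.foldl
      (fun (st : String × List String) c =>
        if starting_at ≤ c.1 then
          if c.2 < st.1 then (c.2, [c.1, c.2]) else st
        else st)
      ("23:00", [])).2

-- ===== PORT B =====
-- Source B: for c in sorted(classes, key=lambda c: c[1]): if c[0] >= starting_at and c[1] < '23:00': return c
--       return []
-- The for-with-early-return is the structural recursion pvScan over the sorted list.
def pvScan (starting_at : String) : List (String × String) → List String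
  | [] => []
  | c :: rest =>
    if starting_at ≤ c.1 ∧ c.2 < "23:00" then [c.1, c.2] else pvScan starting_at rest

def get_earlier_class_alt (classes : List (String × String)) (starting_at : String) : List String :=
  pvScan starting_at (PySem.List.sorted classes (fun c => c.2) false)

-- ===== PRECONDITION & SPEC =====
def Spec_get_earlier_class (classes : List (String × String)) (starting_at : String) (out : List String) : Prop := out = get_earlier_class_alt classes starting_at
instance (classes : List (String × String)) (starting_at : String) (out : List String) : Decidable (Spec_get_earlier_class classes starting_at out) := by unfold Spec_get_earlier_class; infer_instance

-- ===== CLAIM (what is proved, stated in full; the proofs are below) =====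
def Claim_equal_get_earlier_class : Prop := ∀ (classes : List (String × String)) (starting_at : String), Dom_get_earlier_class classes starting_at → Spec_get_earlier_class classes starting_at (get_earlier_class classes starting_at)

-- ===== LEMMAS AND PROOFS =====

-- the qualifying predicate
def pvP (sa : String) (c : String × String) : Bool :=
  decide (sa ≤ c.1) && decide (c.2 < "23:00")

-- min?'s folding step (with strict <, keeping the first minimum)
def pvStep (acc : Option (String × String)) (x : String × String) : Option (String × String) :=
  match acc with
  | none => some x
  | some m => if x.2 < m.2 then some x else some m

-- interpret a min?-style accumulator as A's loop state
def pvApply (acc : Option (String × String)) : String × List String :=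
  match acc with
  | none => ("23:00", [])
  | some m => (m.2, [m.1, m.2])

-- core invariant for A: A's fold, started from the image of a min?-accumulator
-- (whose end time is below the sentinel), equals the image of the min?-fold
-- over the filtered remainder.
theorem pv_loop_eq (sa : String) (l : List (String × String))
    (acc : Option (String × String)) (hacc : ∀ m ∈ acc, m.2 < "23:00") :
    l.foldl
      (fun (st : String × List String) c =>
        if sa ≤ c.1 then
          if c.2 < st.1 then (c.2, [c.1, c.2]) else st
        else st)
      (pvApply acc)
    = pvApply ((l.filter (pvP sa)).foldl pvStep acc) := by
  induction l generalizing acc with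
  | nil => simp
  | cons c l ih =>
    simp only [List.foldl_cons, List.filter_cons]
    by_cases h1 : sa ≤ c.1
    · by_cases h2 : c.2 < "23:00"
      · simp only [pvP, h1, h2, decide_true, Bool.and_self, if_true, List.foldl_cons]
        cases acc with
        | none =>
          simp only [pvApply, pvStep]
          rw [if_pos h2]
          exact ih (some c) (by simpa using h2)
        | some m =>
          have hm : m.2 < "23:00" := hacc m (by simp)
          simp only [pvApply, pvStep]
          by_cases h3 : c.2 < m.2
          · simp only [if_pos h3]
            exact ih (some c) (by simpa using h2)
          · simp only [if_neg h3]
            exact ih (some m) (by simpa using hm)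
      · have hkeep : ¬ (c.2 < (pvApply acc).1) := by
          cases acc with
          | none => simpa [pvApply] using h2
          | some m =>
            have hm : m.2 < "23:00" := hacc m (by simp)
            simp only [pvApply]
            intro hc
            exact h2 (lt_trans hc hm)
        simp only [pvP, h1, h2, decide_true, decide_false, Bool.and_false, if_true, if_neg hkeep]
        exact ih acc hacc
    · simp only [pvP, h1, decide_false, Bool.false_and, if_false]
      exact ih acc hacc

-- B's scan over a list is head? of its filter
theorem pv_scan_eq_head_filter (sa : String) (l : List (String × String)) :
    pvScan sa l = (match (l.filter (pvP sa)).head? with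
                   | none => []
                   | some m => [m.1, m.2]) := by
  induction l with
  | nil => rfl
  | cons c l ih =>
    simp only [pvScan, List.filter_cons, pvP]
    by_cases h : sa ≤ c.1 ∧ c.2 < "23:00"
    · simp [h.1, h.2]
    · rcases not_and_or.mp h with h1 | h2
      · simpa [h1] using ih
      · simpa [h2] using ih

-- when p y = false, filtering erases the inserted element
theorem pv_filter_insertBy_neg {bef : (String × String) → (String × String) → Bool}
    (p : (String × String) → Bool) (y : String × String) (hy : p y = false)
    (S : List (String × String)) :
    (PySem.List.insertBy bef y S).filter p = S.filter p := by
  induction S with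
  | nil => simp [PySem.List.insertBy, hy]
  | cons m t ih =>
    simp only [PySem.List.insertBy]
    by_cases h : bef y m = true
    · simp [h, hy, List.filter_cons]
    · simp only [Bool.not_eq_true] at h
      simp [h, List.filter_cons, ih]

-- when p y = true, on a key-sorted list, inserting y then filtering then taking
-- the head is exactly one min?-step on the old filtered head.
theorem pv_head_filter_insertBy_pos (p : (String × String) → Bool)
    (y : String × String) (hy : p y = true) (S : List (String × String))
    (hS : S.Pairwise (fun a b => a.2 ≤ b.2)) :
    ((PySem.List.insertBy (fun a b => decide (a.2 < b.2)) y S).filter p).head?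
    = (match (S.filter p).head? with
       | none => some y
       | some m => if y.2 < m.2 then some y else some m) := by
  induction S with
  | nil => simp [PySem.List.insertBy, hy]
  | cons m t ih =>
    have hpair := List.pairwise_cons.mp hS
    simp only [PySem.List.insertBy]
    by_cases h : y.2 < m.2
    · have hL : ((y :: m :: t).filter p).head? = some y := by simp [List.filter_cons, hy]
      simp only [h, decide_true, if_true]
      rw [hL]
      cases hfm : ((m :: t).filter p).head? with
      | none => rfl
      | some m' =>
        have hm' : m' ∈ m :: t :=
          List.mem_of_mem_filter (List.mem_of_mem_head? (Option.mem_def.mpr hfm))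
        have hle : m.2 ≤ m'.2 := by
          rcases List.mem_cons.mp hm' with rfl | hmem
          · exact le_refl _
          · exact hpair.1 m' hmem
        have hlt : y.2 < m'.2 := lt_of_lt_of_le h hle
        simp [hlt]
    · simp only [h, decide_false, Bool.false_eq_true, if_false, List.filter_cons]
      by_cases hpm : p m = true
      · simp [hpm, h]
      · simp only [Bool.not_eq_true] at hpm
        simp only [hpm, Bool.false_eq_true, if_false]
        exact ih hpair.2

-- insertBy preserves key-sortedness
theorem pv_insertBy_pairwise (y : String × String) (S : List (String × String))
    (hS : S.Pairwise (fun a b => a.2 ≤ b.2)) :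
    (PySem.List.insertBy (fun a b => decide (a.2 < b.2)) y S).Pairwise
      (fun a b => a.2 ≤ b.2) := by
  induction S with
  | nil => simp [PySem.List.insertBy]
  | cons m t ih =>
    have hpair := List.pairwise_cons.mp hS
    simp only [PySem.List.insertBy]
    by_cases h : y.2 < m.2
    · simp only [h, decide_true, if_true]
      refine List.pairwise_cons.mpr ⟨?_, hS⟩
      intro b hb
      rcases List.mem_cons.mp hb with rfl | hmem
      · exact le_of_lt h
      · exact le_trans (le_of_lt h) (hpair.1 b hmem)
    · simp only [h, decide_false, Bool.false_eq_true, if_false]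
      refine List.pairwise_cons.mpr ⟨?_, ih hpair.2⟩
      intro b hb
      rcases (PySem.List.mem_insertBy _ _ _ _).mp hb with rfl | hmem
      · exact le_of_not_gt h
      · exact hpair.1 b hmem

-- MAIN BRIDGE: head of the filtered stable sort = the min?-fold over the filter
-- of the original list (stability matches the strict-< first-minimum rule).
theorem pv_head_sorted_filter (p : (String × String) → Bool)
    (xs : List (String × String)) :
    ((PySem.List.sorted xs (fun c => c.2) false).filter p).head?
    = (xs.filter p).foldl pvStep none := by
  have main : ∀ (l : List (String × String)),
      ((l.foldl (fun acc x => PySem.List.insertBy (fun a b => decide (a.2 < b.2)) x acc) []).filter p).head?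
        = (l.filter p).foldl pvStep none
      ∧ (l.foldl (fun acc x => PySem.List.insertBy (fun a b => decide (a.2 < b.2)) x acc) []).Pairwise
          (fun a b => a.2 ≤ b.2) := by
    intro l
    induction l using List.reverseRecOn with
    | nil => simp
    | append_singleton l y ih =>
      rw [List.foldl_append, List.filter_append, List.foldl_append]
      refine ⟨?_, pv_insertBy_pairwise y _ ih.2⟩
      simp only [List.foldl_cons, List.foldl_nil, List.filter_cons, List.filter_nil]
      by_cases hy : p y = true
      · rw [hy, if_pos rfl]
        rw [pv_head_filter_insertBy_pos p y hy _ ih.2, ih.1]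
        cases (l.filter p).foldl pvStep none with
        | none => rfl
        | some m => rfl
      · simp only [Bool.not_eq_true] at hy
        rw [hy]
        simp only [Bool.false_eq_true, if_false, List.foldl_nil]
        rw [pv_filter_insertBy_neg p y hy, ih.1]
  rw [PySem.List.sorted_eq_foldl_insertBy]
  exact (main xs).1

-- ===== VERDICT (by name: the statement is the Claim_ definition above) =====
theorem get_earlier_class_spec : Claim_equal_get_earlier_class := by
  intro classes sa _
  show get_earlier_class classes sa = get_earlier_class_alt classes sa
  unfold get_earlier_class get_earlier_class_alt
  by_cases hnil : classes = []
  · subst hnil; rfl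
  · rw [if_neg hnil]
    have h := pv_loop_eq sa classes none (by simp)
    simp only [pvApply] at h
    rw [h, pv_scan_eq_head_filter sa, pv_head_sorted_filter (pvP sa) classes]
    cases (classes.filter (pvP sa)).foldl pvStep none with
    | none => rfl
    | some m => rfl
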